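-- pv_equiv track=rewrite | github.com/brendenrossin/SecondBrain | src/secondbrain/scripts/inbox_processor.py | _append_under_heading
-- ===== SOURCE A (Python) =====
-- def _append_under_heading(content: str, heading: str, line: str) -> str:
--     """Append a line under a specific heading in markdown content."""
--     lines = content.split("\n")
--     insert_idx = None
--
--     for i, ln in enumerate(lines):
--         if ln.strip() == heading:
--             # Find the end of this section (next heading of same or higher level)
--             heading_level = len(heading) - len(heading.lstrip("#"))
--             insert_idx = i + 1
--             for j in range(i + 1, len(lines)):
--                 stripped = lines[j].strip()
--                 if stripped.startswith("#") and not stripped.startswith("#" * (heading_level + 1)):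
--                     # Hit a same-level or higher heading
--                     break
--                 insert_idx = j + 1
--             break
--
--     if insert_idx is not None:
--         lines.insert(insert_idx, line)
--     else:
--         # Heading not found, append at end
--         lines.append("")
--         lines.append(heading)
--         lines.append(line)
--
--     return "\n".join(lines)
-- ===== SOURCE B (Python) =====
-- def _append_under_heading(content: str, heading: str, line: str) -> str:
--     """Single forward pass with found/inside flags instead of index splicing."""
--     heading_level = len(heading) - len(heading.lstrip("#"))
--     marker = "#" * (heading_level + 1)
--     out = []
--     found = False
--     inside = False
--     for ln in content.split("\n"):
--         if inside:
--             stripped = ln.strip()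
--             if stripped.startswith("#") and not stripped.startswith(marker):
--                 out.append(line)
--                 inside = False
--         elif not found and ln.strip() == heading:
--             found = True
--             inside = True
--         out.append(ln)
--     if inside:
--         out.append(line)
--     if not found:
--         out.extend(["", heading, line])
--     return "\n".join(out)
-- ===== Notes on version B (the rewrite author's own statement) =====
-- stated objective: alternative
-- what changed: Replaced A's two-phase find-an-insertion-index-then-list.insert splice (enumerate loop plus inner range scan over indices) with a single forward pass that builds the output list directly while maintaining found/inside flags, appending the new line when the section closes or at EOF.
import Mathlib
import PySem

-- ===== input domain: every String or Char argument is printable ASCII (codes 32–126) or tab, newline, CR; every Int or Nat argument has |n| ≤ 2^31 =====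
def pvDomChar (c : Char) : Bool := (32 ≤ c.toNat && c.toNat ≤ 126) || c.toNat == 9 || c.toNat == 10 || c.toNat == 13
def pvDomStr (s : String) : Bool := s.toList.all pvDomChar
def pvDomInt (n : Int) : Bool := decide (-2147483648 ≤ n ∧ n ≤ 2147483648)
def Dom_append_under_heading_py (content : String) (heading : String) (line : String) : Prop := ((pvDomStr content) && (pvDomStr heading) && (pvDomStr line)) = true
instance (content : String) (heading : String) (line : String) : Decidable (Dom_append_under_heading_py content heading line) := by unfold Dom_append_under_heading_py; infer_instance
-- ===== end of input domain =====

-- B replaces A's find-an-index-then-splice pass with a single forward pass keeping found/inside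
-- flags (objective: alternative decomposition, same O(n) cost).

-- ===== PORT A =====
-- 'stripped.startswith("#") and not stripped.startswith("#" * (heading_level + 1))'
-- ("#" * n is exactly List.replicate n '#' as a string, n ≥ 0 here)
def aBreakPred (lvl : Nat) (stripped : String) : Bool :=
  PySem.Str.startswith stripped "#" && !(PySem.Str.startswith stripped (String.ofList (List.replicate (lvl + 1) '#')))

-- the inner 'for j in range(i+1, len(lines))' loop with the running insert_idx (idx), break on the predicate
def aScan (lvl : Nat) (rest : List String) (idx : Nat) : Nat :=
  match rest with
  | [] => idx
  | l :: rs =>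
    let stripped := PySem.Str.strip l
    if aBreakPred lvl stripped then idx else aScan lvl rs (idx + 1)

-- the outer 'for i, ln in enumerate(lines)' loop with break on the first match
-- (len(heading) - len(heading.lstrip("#")) = number of leading '#'s, exact: lstrip("#") drops leading '#'s)
def aFind (heading : String) (lines : List String) (i : Nat) : Option Nat :=
  match lines with
  | [] => none
  | l :: rs =>
    if PySem.Str.strip l == heading then
      let lvl := heading.toList.length - (heading.toList.dropWhile (· == '#')).length
      some (aScan lvl rs (i + 1))
    else aFind heading rs (i + 1)

def append_under_heading_py (content : String) (heading : String) (line : String) : String :=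
  let lines := (PySem.Str.split? content "\n").getD []   -- sep "\n" ≠ "", so split? is some
  match aFind heading lines 0 with
  | some idx => PySem.Str.join "\n" (PySem.List.insert lines (idx : Int) line)
  | none => PySem.Str.join "\n" (lines ++ ["", heading, line])

-- ===== PORT B =====
def bBreakPred (marker : String) (stripped : String) : Bool :=
  PySem.Str.startswith stripped "#" && !(PySem.Str.startswith stripped marker)

-- Source B's single loop over the lines, state = (found, inside), building the output front-to-back;
-- the two trailing appends of Source B are the base case
def bGo (marker : String) (heading : String) (line : String)
    (lines : List String) (found : Bool) (inside : Bool) : List String :=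
  match lines with
  | [] => (if inside then [line] else []) ++ (if found then [] else ["", heading, line])
  | ln :: rs =>
    if inside then
      let stripped := PySem.Str.strip ln
      if bBreakPred marker stripped then line :: ln :: bGo marker heading line rs found false
      else ln :: bGo marker heading line rs found true
    else if !found && (PySem.Str.strip ln == heading) then
      ln :: bGo marker heading line rs true true
    else
      ln :: bGo marker heading line rs found inside

def append_under_heading_py_alt (content : String) (heading : String) (line : String) : String :=
  let heading_level := heading.toList.length - (heading.toList.dropWhile (· == '#')).length
  let marker := String.ofList (List.replicate (heading_level + 1) '#')
  PySem.Str.join "\n" (bGo marker heading line ((PySem.Str.split? content "\n").getD []) false false)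

-- ===== PRECONDITION & SPEC =====
def Spec_append_under_heading_py (content : String) (heading : String) (line : String) (out : String) : Prop := out = append_under_heading_py_alt content heading line
instance (content : String) (heading : String) (line : String) (out : String) : Decidable (Spec_append_under_heading_py content heading line out) := by unfold Spec_append_under_heading_py; infer_instance

-- ===== CLAIM (what is proved, stated in full; the proofs are below) =====
def Claim_equal_append_under_heading_py : Prop := ∀ (content : String) (heading : String) (line : String), Dom_append_under_heading_py content heading line → Spec_append_under_heading_py content heading line (append_under_heading_py content heading line)

-- ===== LEMMAS AND PROOFS =====

-- relative version of aScan: how many leading lines of rest do NOT break the section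
def scanK (lvl : Nat) (rest : List String) : Nat :=
  match rest with
  | [] => 0
  | l :: rs => if aBreakPred lvl (PySem.Str.strip l) then 0 else scanK lvl rs + 1

theorem bBreak_eq_aBreak (lvl : Nat) (s : String) :
    bBreakPred (String.ofList (List.replicate (lvl + 1) '#')) s = aBreakPred lvl s := rfl

theorem aScan_eq (lvl : Nat) (rest : List String) (idx : Nat) :
    aScan lvl rest idx = idx + scanK lvl rest := by
  induction rest generalizing idx with
  | nil => simp [aScan, scanK]
  | cons l rs ih =>
    simp only [aScan, scanK]
    split_ifs with h
    · simp
    · rw [ih]; omega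

theorem scanK_le (lvl : Nat) (rest : List String) : scanK lvl rest ≤ rest.length := by
  induction rest with
  | nil => simp [scanK]
  | cons l rs ih =>
    simp only [scanK, List.length_cons]
    split_ifs with h
    · omega
    · omega

-- after the section is closed (inside = false, found = true) Source B's loop just copies the rest
theorem bGo_copy (marker heading line : String) (rest : List String) :
    bGo marker heading line rest true false = rest := by
  induction rest with
  | nil => simp [bGo]
  | cons l rs ih => simp [bGo, ih]

-- inside the section, Source B's loop inserts `line` exactly scanK positions further on
theorem bGo_inside (lvl : Nat) (heading line : String) (rest : List String) :
    bGo (String.ofList (List.replicate (lvl + 1) '#')) heading line rest true true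
      = rest.take (scanK lvl rest) ++ line :: rest.drop (scanK lvl rest) := by
  induction rest with
  | nil => simp [bGo, scanK]
  | cons l rs ih =>
    by_cases hb : aBreakPred lvl (PySem.Str.strip l) = true
    · simp [bGo, scanK, bBreak_eq_aBreak, hb, bGo_copy]
    · simp [bGo, scanK, bBreak_eq_aBreak, hb, ih]

-- relative version of aFind (lvl passed explicitly)
def findK (lvl : Nat) (heading : String) (lines : List String) : Option Nat :=
  match lines with
  | [] => none
  | l :: rs =>
    if PySem.Str.strip l == heading then some (scanK lvl rs + 1)
    else (findK lvl heading rs).map (· + 1)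

theorem aFind_eq (heading : String) (lines : List String) (i : Nat) :
    aFind heading lines i
      = (findK (heading.toList.length - (heading.toList.dropWhile (· == '#')).length)
          heading lines).map (i + ·) := by
  induction lines generalizing i with
  | nil => simp [aFind, findK]
  | cons l rs ih =>
    simp only [aFind, findK]
    split_ifs with h
    · simp [aScan_eq]; omega
    · rw [ih]; cases findK (heading.toList.length - (heading.toList.dropWhile (· == '#')).length) heading rs <;> simp <;> omega

theorem findK_le (lvl : Nat) (heading : String) (lines : List String) (k : Nat)
    (h : findK lvl heading lines = some k) : k ≤ lines.length := by
  induction lines generalizing k with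
  | nil => simp [findK] at h
  | cons l rs ih =>
    simp only [findK] at h
    split_ifs at h with hm
    · have := scanK_le lvl rs
      simp only [Option.some.injEq] at h
      simp only [List.length_cons]; omega
    · cases hf : findK lvl heading rs with
      | none => simp [hf] at h
      | some k' =>
        simp [hf] at h
        have := ih k' hf
        simp only [List.length_cons]; omega

-- the heart of the proof: A's splice equals B's single pass, on any list of lines
theorem main_list (lvl : Nat) (heading line : String) (lines : List String) :
    (match findK lvl heading lines with
      | some k => lines.take k ++ line :: lines.drop k
      | none => lines ++ ["", heading, line])
      = bGo (String.ofList (List.replicate (lvl + 1) '#')) heading line lines false false := by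
  induction lines with
  | nil => simp [findK, bGo]
  | cons l rs ih =>
    by_cases h : (PySem.Str.strip l == heading) = true
    · rw [show findK lvl heading (l :: rs) = some (scanK lvl rs + 1) from by simp [findK, h]]
      rw [show bGo (String.ofList (List.replicate (lvl + 1) '#')) heading line (l :: rs) false false
            = l :: bGo (String.ofList (List.replicate (lvl + 1) '#')) heading line rs true true
          from by simp [bGo, h]]
      simp only [List.take_succ_cons, List.drop_succ_cons, List.cons_append, bGo_inside]
    · rw [show findK lvl heading (l :: rs) = (findK lvl heading rs).map (· + 1) from by simp [findK, h]]
      rw [show bGo (String.ofList (List.replicate (lvl + 1) '#')) heading line (l :: rs) false false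
            = l :: bGo (String.ofList (List.replicate (lvl + 1) '#')) heading line rs false false
          from by simp [bGo, h]]
      cases hf : findK lvl heading rs with
      | none => simp only [hf] at ih ⊢; simp [← ih]
      | some k =>
        simp only [hf] at ih ⊢
        simp only [Option.map_some, List.take_succ_cons, List.drop_succ_cons, List.cons_append, ih]

-- ===== VERDICT (by name: the statement is the Claim_ definition above) =====
theorem append_under_heading_py_spec : Claim_equal_append_under_heading_py := by
  intro content heading line _
  unfold Spec_append_under_heading_py append_under_heading_py append_under_heading_py_alt
  generalize (PySem.Str.split? content "\n").getD [] = lines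
  dsimp only
  rw [aFind_eq]
  generalize hlvl : heading.toList.length - (heading.toList.dropWhile (· == '#')).length = lvl
  have hm := main_list lvl heading line lines
  cases hf : findK lvl heading lines with
  | none => simp only [hf] at hm ⊢; simp [← hm]
  | some k =>
    have hk := findK_le lvl heading lines k hf
    simp only [hf, Option.map_some] at hm ⊢
    rw [show ((0 + k : Nat) : Int) = (k : Int) by omega]
    rw [PySem.List.insert_natCast lines k line hk, hm]
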